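-- pv_equiv track=rewrite | github.com/anhbkpro/leetcode | lc_1758_minimum_changes_to_make_alternating_binary_string.py | helper
-- ===== SOURCE A (Python) =====
-- def helper(s: str, flip: bool) -> int:
--     ans = 0
--     if flip:
--         first = "1" if s[0] == "0" else "0"
--     else:
--         first = s[0]
--
--     second = "0" if first == "1" else "1"
--     for i in range(0, len(s)):
--         if i % 2 == 0:
--             if s[i] != first:
--                 ans += 1
--         else:
--             if s[i] != second:
--                 ans += 1
--
--     return ans
-- ===== SOURCE B (Python) =====
-- def helper(s: str, flip: bool) -> int:
--     first = ("1" if s[0] == "0" else "0") if flip else s[0]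
--     second = "0" if first == "1" else "1"
--     even, odd = s[0::2], s[1::2]
--     return (len(even) - even.count(first)) + (len(odd) - odd.count(second))
-- ===== Notes on version B (the rewrite author's own statement) =====
-- stated objective: faster
-- what changed: Replaces the indexed loop with its per-index parity test by splitting the string into the even-index and odd-index slices and computing each bucket's mismatch count as length minus occurrence count of the expected character.
import Mathlib
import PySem

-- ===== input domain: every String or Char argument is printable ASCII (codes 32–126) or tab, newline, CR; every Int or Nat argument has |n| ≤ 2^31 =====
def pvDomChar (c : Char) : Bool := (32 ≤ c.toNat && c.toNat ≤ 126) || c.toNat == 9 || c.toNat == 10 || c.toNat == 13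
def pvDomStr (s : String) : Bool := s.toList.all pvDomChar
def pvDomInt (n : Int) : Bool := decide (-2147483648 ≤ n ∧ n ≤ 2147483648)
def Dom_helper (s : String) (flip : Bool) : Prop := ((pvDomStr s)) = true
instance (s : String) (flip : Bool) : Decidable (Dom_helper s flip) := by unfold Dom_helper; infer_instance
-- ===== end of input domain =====

-- B counts mismatches per parity bucket (even/odd slices + occurrence counts) instead of A's indexed compare loop.

-- ===== PORT A =====
def helper (s : String) (flip : Bool) : Int :=
  let cs := s.toList
  let first : Char :=
    if flip then (if (PySem.List.pyGet? cs 0).getD ' ' = '0' then '1' else '0')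
    else (PySem.List.pyGet? cs 0).getD ' '
  let second : Char := if first = '1' then '0' else '1'
  (PySem.List.pyRange 0 (PySem.List.len cs) 1).foldl
    (fun ans i =>
      if PySem.Int.mod i 2 = 0 then
        (if PySem.List.pyGetD cs i ' ' ≠ first then ans + 1 else ans)
      else
        (if PySem.List.pyGetD cs i ' ' ≠ second then ans + 1 else ans)) 0

-- ===== PORT B =====
-- str.count with a one-character needle is exactly the character count, ported as List.count.
def helper_alt (s : String) (flip : Bool) : Int :=
  let cs := s.toList
  let c0 := (PySem.List.pyGet? cs 0).getD ' '
  let first : Char := if flip then (if c0 = '0' then '1' else '0') else c0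
  let second : Char := if first = '1' then '0' else '1'
  let even := (PySem.List.slice? cs (some 0) none 2).getD []
  let odd := (PySem.List.slice? cs (some 1) none 2).getD []
  ((even.length : Int) - (even.count first : Int)) + ((odd.length : Int) - (odd.count second : Int))

-- ===== PRECONDITION & SPEC =====
-- Pre_ excludes only the empty string, on which A (and B alike) raise IndexError at s[0].
def Pre_helper (s : String) (flip : Bool) : Prop := s ≠ ""
instance (s : String) (flip : Bool) : Decidable (Pre_helper s flip) := by unfold Pre_helper; infer_instance
def pvWitness_helper : String × Bool := ("0101", false)
def Spec_helper (s : String) (flip : Bool) (out : Int) : Prop := out = helper_alt s flip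
instance (s : String) (flip : Bool) (out : Int) : Decidable (Spec_helper s flip out) := by unfold Spec_helper; infer_instance

-- ===== CLAIM (what is proved, stated in full; the proofs are below) =====
def Claim_equal_helper : Prop := ∀ (s : String) (flip : Bool), Dom_helper s flip → Pre_helper s flip → Spec_helper s flip (helper s flip)

-- ===== LEMMAS AND PROOFS =====

-- mis a b cs = number of positions where cs disagrees with the alternating pattern a b a b …
def mis {α : Type} [DecidableEq α] (a b : α) : List α → Int
  | [] => 0
  | c :: r => (if c ≠ a then 1 else 0) + mis b a r

-- A's enumerate-fold computes mis, with the pattern phase given by the parity of the start index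
lemma afold {α : Type} [DecidableEq α] (first second : α) : ∀ (cs : List α) (k : Int) (acc : Int),
    (PySem.List.enumerate cs k).foldl
      (fun ans (p : Int × α) =>
        if PySem.Int.mod p.1 2 = 0 then
          (if p.2 ≠ first then ans + 1 else ans)
        else
          (if p.2 ≠ second then ans + 1 else ans)) acc
    = acc + (if PySem.Int.mod k 2 = 0 then mis first second cs else mis second first cs) := by
  intro cs
  induction cs with
  | nil => intro k acc; simp [PySem.List.enumerate, mis]
  | cons c r ih =>
    intro k acc
    rw [PySem.List.enumerate_cons, List.foldl_cons, ih]
    have hm : PySem.Int.mod (k+1) 2 = 0 ↔ ¬ PySem.Int.mod k 2 = 0 := by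
      simp only [PySem.Int.mod, Int.fmod_eq_emod]; omega
    by_cases h : PySem.Int.mod k 2 = 0
    · have h1 : ¬ PySem.Int.mod (k+1) 2 = 0 := by rw [hm]; exact fun hh => hh h
      rw [if_pos h, if_neg h1, if_pos h]
      by_cases hc : c = first <;> simp only [hc, mis, ne_eq, not_true_eq_false, if_false,
        not_false_eq_true, if_true] <;> ring
    · have h1 : PySem.Int.mod (k+1) 2 = 0 := hm.mpr h
      rw [if_neg h, if_pos h1, if_neg h]
      by_cases hc : c = second <;> simp only [hc, mis, ne_eq, not_true_eq_false, if_false,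
        not_false_eq_true, if_true] <;> ring

-- A's range-fold equals mis first second
lemma A_eq_mis (cs : List Char) (first second : Char) :
    (PySem.List.pyRange 0 (PySem.List.len cs) 1).foldl
      (fun ans i =>
        if PySem.Int.mod i 2 = 0 then
          (if PySem.List.pyGetD cs i ' ' ≠ first then ans + 1 else ans)
        else
          (if PySem.List.pyGetD cs i ' ' ≠ second then ans + 1 else ans)) 0
    = mis first second cs := by
  have h := afold first second cs 0 0
  rw [PySem.List.enumerate_eq_map_pyRange cs ' ', List.foldl_map] at h
  have h2 : (0:Int) + (if PySem.Int.mod 0 2 = 0 then mis first second cs else mis second first cs)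
      = mis first second cs := by norm_num [PySem.Int.mod]
  rw [h2] at h
  exact h

-- evens cs = the even-index elements of cs (proof-side characterisation of s[0::2])
def evens {α : Type} : List α → List α
  | [] => []
  | [a] => [a]
  | a :: _ :: r => a :: evens r

lemma evens_cons {α : Type} (y : α) (r : List α) : evens (y :: r) = y :: evens r.tail := by
  cases r <;> simp [evens]

lemma fm_evens {α : Type} : ∀ cs : List α,
    (List.range ((cs.length + 1) / 2)).filterMap (fun k => cs[2 * k]?) = evens cs := by
  intro cs
  induction cs using evens.induct with
  | case1 => simp [evens]
  | case2 x => simp [evens]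
  | case3 x y r ih =>
    have hlen : (x :: y :: r).length = r.length + 2 := by simp
    rw [hlen, show (r.length + 2 + 1) / 2 = (r.length + 1) / 2 + 1 by omega,
      List.range_succ_eq_map, List.filterMap_cons, List.filterMap_map]
    have hf : ((fun k => (x :: y :: r)[2 * k]?) ∘ Nat.succ) = fun k => r[2 * k]? := by
      funext k
      simp [Nat.succ_eq_add_one, show 2 * (k + 1) = 2 * k + 1 + 1 by omega]
    rw [hf, ih]
    simp [evens]

lemma slice0_eq {α : Type} (cs : List α) :
    (PySem.List.slice? cs (some 0) none 2).getD [] = evens cs := by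
  rw [← fm_evens]
  simp [PySem.List.slice?, PySem.List.sliceIndices]
  congr 1
  congr 1
  split_ifs with h <;> omega

lemma slice1_eq {α : Type} (cs : List α) :
    (PySem.List.slice? cs (some 1) none 2).getD [] = evens cs.tail := by
  rw [← fm_evens]
  cases cs with
  | nil => simp [PySem.List.slice?, PySem.List.sliceIndices]
  | cons c r =>
    simp [PySem.List.slice?, PySem.List.sliceIndices]
    congr 1
    · funext x
      rw [show ((1:Int) + 2 * (x:Int)).toNat = 2 * x + 1 by omega]
      simp
    · congr 1
      split_ifs with h <;> omega

-- B's bucket arithmetic equals mis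
lemma mis_eq_buckets {α : Type} [DecidableEq α] : ∀ (cs : List α) (a b : α),
    (((evens cs).length : Int) - ((evens cs).count a : Int))
      + (((evens cs.tail).length : Int) - ((evens cs.tail).count b : Int)) = mis a b cs := by
  intro cs
  induction cs using evens.induct with
  | case1 => intro a b; simp [evens, mis]
  | case2 x => intro a b; by_cases hx : x = a <;> simp [evens, mis, hx, List.count_cons]
  | case3 x y r ih =>
    intro a b
    have := ih a b
    by_cases hx : x = a <;> by_cases hy : y = b <;>
      (try simp [evens, evens_cons, mis, List.count_cons, hx, hy] at this ⊢) <;>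
      push_cast at this ⊢ <;> omega

-- ===== VERDICT (by name: the statement is the Claim_ definition above) =====
theorem helper_spec : Claim_equal_helper := by
  intro s flip _ _
  unfold Spec_helper helper helper_alt
  simp only []
  rw [A_eq_mis, slice0_eq, slice1_eq]
  exact (mis_eq_buckets s.toList _ _).symm
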